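-- pv_equiv track=rewrite | github.com/HugoCls/CTFs-WriteUps | BDSec2025/time based caesar/caesar/main.py | decrypt_caesar_variable
-- ===== SOURCE A (Python) =====
-- import string
--
-- def decrypt_caesar_variable(ciphertext, key, extra_shift=0):
--     plaintext = ""
--     key_len = len(key)
--     key_pos = 0
--
--     for c in ciphertext:
--         if c in '{}_':
--             plaintext += c
--             continue
--
--         key_chr = key[key_pos % key_len]
--
--         if key_chr in string.digits:
--             shift = int(key_chr)
--         else:
--             shift = ord(key_chr) % 256
--
--         shift = (shift + extra_shift) % 256
--
--         decrypted_ord = (ord(c) - shift) % 256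
--         plaintext += chr(decrypted_ord)
--
--         key_pos += 1
--
--     return plaintext
-- ===== SOURCE B (Python) =====
-- import string
--
-- def decrypt_caesar_variable(ciphertext, key, extra_shift=0):
--     # filter/map/interleave pipeline: precomputed shift table, filtered subsequence,
--     # then splice decrypted chars back between the literal '{}_' characters
--     table = []
--     for kc in key:
--         base = int(kc) if kc in string.digits else ord(kc) % 256
--         table.append((base + extra_shift) % 256)
--     keep = [c for c in ciphertext if c not in '{}_']
--     decoded = [chr((ord(c) - table[j % len(table)]) % 256) for j, c in enumerate(keep)]
--     it = iter(decoded)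
--     return ''.join(c if c in '{}_' else next(it) for c in ciphertext)
-- ===== Notes on version B (the rewrite author's own statement) =====
-- stated objective: alternative
-- what changed: Replaces A's single stateful loop (running key position, string concatenation) with a filter/map/interleave pipeline: a precomputed per-key-index shift table, the filtered subsequence of decryptable characters decoded by their filtered position, and a final splice that re-inserts the literal '{}_' characters.
import Mathlib
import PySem

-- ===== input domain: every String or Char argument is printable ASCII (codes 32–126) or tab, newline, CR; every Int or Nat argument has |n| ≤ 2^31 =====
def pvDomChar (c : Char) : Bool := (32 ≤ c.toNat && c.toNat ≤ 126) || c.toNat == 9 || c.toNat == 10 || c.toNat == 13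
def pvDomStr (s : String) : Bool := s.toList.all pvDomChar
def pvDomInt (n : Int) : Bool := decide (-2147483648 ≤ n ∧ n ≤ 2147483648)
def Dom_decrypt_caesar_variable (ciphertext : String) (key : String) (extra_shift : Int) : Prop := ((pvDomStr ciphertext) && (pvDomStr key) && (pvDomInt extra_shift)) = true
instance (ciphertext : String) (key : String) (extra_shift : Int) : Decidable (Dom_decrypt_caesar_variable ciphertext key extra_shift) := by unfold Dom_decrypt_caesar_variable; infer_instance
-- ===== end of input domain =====

-- B restructures A's stateful loop as a filter/map/interleave pipeline (objective: alternative; same cost).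
-- Pre_ excludes exactly the inputs where the Python A raises ZeroDivisionError (empty key with a
-- decryptable character); B raises there too.

-- shared literal: the membership test `c in '{}_'` both Pythons perform
def pvSep (c : Char) : Bool := ['{', '}', '_'].contains c

-- ===== PORT A =====
-- per-character shift from key position pos: key[key_pos % key_len], in range under Pre_,
-- so the Python indexing is ported with getD (default never read)
def pvShiftA (key : String) (extra_shift : Int) (pos : Nat) : Int :=
  let key_chr := key.toList.getD (pos % key.toList.length) ' '
  let s : Int := if ("0123456789".toList.contains key_chr) then (key_chr.toNat : Int) - 48
                 else ((key_chr.toNat % 256 : Nat) : Int)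
  PySem.Int.mod (s + extra_shift) 256

-- the for-loop: state = remaining ciphertext chars and the running key_pos
def pvGoA (key : String) (extra_shift : Int) : List Char → Nat → List Char
  | [], _ => []
  | c :: rest, pos =>
    if pvSep c then c :: pvGoA key extra_shift rest pos
    else Char.ofNat ((PySem.Int.mod ((c.toNat : Int) - pvShiftA key extra_shift pos) 256).toNat)
           :: pvGoA key extra_shift rest (pos + 1)

def decrypt_caesar_variable (ciphertext : String) (key : String) (extra_shift : Int) : String :=
  String.mk (pvGoA key extra_shift ciphertext.toList 0)

-- ===== PORT B =====
def pvTableB (key : String) (extra_shift : Int) : List Int :=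
  key.toList.map (fun kc =>
    PySem.Int.mod ((if "0123456789".toList.contains kc then (kc.toNat : Int) - 48
                    else ((kc.toNat % 256 : Nat) : Int)) + extra_shift) 256)

def pvDecodeB (c : Char) (sh : Int) : Char :=
  Char.ofNat ((PySem.Int.mod ((c.toNat : Int) - sh) 256).toNat)

-- the splice: literal '{}_' chars from the ciphertext, otherwise the next decoded char
def pvSpliceB : List Char → List Char → List Char
  | [], _ => []
  | c :: rest, ds =>
    if pvSep c then c :: pvSpliceB rest ds
    else match ds with
      | d :: ds' => d :: pvSpliceB rest ds'
      | [] => []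

def decrypt_caesar_variable_alt (ciphertext : String) (key : String) (extra_shift : Int) : String :=
  String.mk (pvSpliceB ciphertext.toList
    ((ciphertext.toList.filter (fun c => !pvSep c)).mapIdx
      (fun j c => pvDecodeB c ((pvTableB key extra_shift).getD
        (j % (pvTableB key extra_shift).length) 0))))

-- ===== PRECONDITION & SPEC =====
-- Pre_ excludes exactly the inputs where A raises ZeroDivisionError: key == "" while the
-- ciphertext contains a character outside '{}_' (A computes key_pos % 0 there); B raises there too.
def Pre_decrypt_caesar_variable (ciphertext : String) (key : String) (extra_shift : Int) : Prop :=
  key ≠ "" ∨ ciphertext.toList.all pvSep = true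
instance (ciphertext : String) (key : String) (extra_shift : Int) : Decidable (Pre_decrypt_caesar_variable ciphertext key extra_shift) := by unfold Pre_decrypt_caesar_variable; infer_instance

def pvWitness_decrypt_caesar_variable : String × String × Int := ("ab{_c", "k2", 1)

def Spec_decrypt_caesar_variable (ciphertext : String) (key : String) (extra_shift : Int) (out : String) : Prop := out = decrypt_caesar_variable_alt ciphertext key extra_shift
instance (ciphertext : String) (key : String) (extra_shift : Int) (out : String) : Decidable (Spec_decrypt_caesar_variable ciphertext key extra_shift out) := by unfold Spec_decrypt_caesar_variable; infer_instance

-- ===== CLAIM (what is proved, stated in full; the proofs are below) =====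
def Claim_equal_decrypt_caesar_variable : Prop := ∀ (ciphertext : String) (key : String) (extra_shift : Int), Dom_decrypt_caesar_variable ciphertext key extra_shift → Pre_decrypt_caesar_variable ciphertext key extra_shift → Spec_decrypt_caesar_variable ciphertext key extra_shift (decrypt_caesar_variable ciphertext key extra_shift)

-- ===== LEMMAS AND PROOFS =====

theorem pv_getD_map {α β : Type} (f : α → β) (d : α) (e : β) :
    ∀ (l : List α) (i : Nat), i < l.length → (l.map f).getD i e = f (l.getD i d)
  | a :: l, 0, _ => rfl
  | a :: l, i + 1, h => by
    simp only [List.map_cons, List.getD_cons_succ]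
    exact pv_getD_map f d e l i (by simpa using h)

-- main invariant: A's loop from key position pos equals B's pipeline decoded from
-- filtered position pos
theorem pv_main (key : String) (extra_shift : Int) (hk : key.toList ≠ []) :
    ∀ (l : List Char) (pos : Nat),
      pvGoA key extra_shift l pos =
        pvSpliceB l ((l.filter (fun c => !pvSep c)).mapIdx
          (fun j c => pvDecodeB c ((pvTableB key extra_shift).getD
            ((pos + j) % (pvTableB key extra_shift).length) 0))) := by
  intro l
  induction l with
  | nil => intro pos; simp [pvGoA, pvSpliceB]
  | cons c rest ih =>
    intro pos
    by_cases hc : pvSep c = true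
    · rw [List.filter_cons_of_neg (by simp [hc])]
      simp only [pvGoA, pvSpliceB, hc, if_pos]
      rw [ih pos]
    · rw [List.filter_cons_of_pos (by simp [hc])]
      simp only [pvGoA, pvSpliceB, hc, if_neg, Bool.false_eq_true, not_false_iff,
        List.mapIdx_cons, Nat.add_zero]
      congr 1
      · -- per-character agreement: table lookup = recomputed shift
        have hmod : pos % key.toList.length < key.toList.length :=
          Nat.mod_lt _ (List.length_pos_iff.mpr hk)
        simp only [pvDecodeB, pvShiftA, pvTableB, List.length_map]
        rw [pv_getD_map _ ' ' 0 _ _ hmod]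
      · rw [ih (pos + 1)]
        congr 2
        funext i a
        rw [show pos + (i + 1) = pos + 1 + i by omega]

-- empty-key case: every character is literal, both sides copy the input
theorem pv_allsep_goA (key : String) (extra_shift : Int) :
    ∀ (l : List Char) (pos : Nat),
      l.all pvSep = true → pvGoA key extra_shift l pos = l := by
  intro l
  induction l with
  | nil => intro pos _; rfl
  | cons c rest ih =>
    intro pos h
    simp only [List.all_cons, Bool.and_eq_true] at h
    simp [pvGoA, h.1, ih pos h.2]

theorem pv_allsep_splice :
    ∀ (l : List Char) (ds : List Char),
      l.all pvSep = true → pvSpliceB l ds = l := by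
  intro l
  induction l with
  | nil => intro ds _; rfl
  | cons c rest ih =>
    intro ds h
    simp only [List.all_cons, Bool.and_eq_true] at h
    simp [pvSpliceB, h.1, ih ds h.2]

-- ===== VERDICT (by name: the statement is the Claim_ definition above) =====
theorem decrypt_caesar_variable_spec : Claim_equal_decrypt_caesar_variable := by
  intro ciphertext key extra_shift _ hpre
  unfold Spec_decrypt_caesar_variable decrypt_caesar_variable decrypt_caesar_variable_alt
  rcases hpre with hk | hall
  · have hk' : key.toList ≠ [] := by
      intro h
      exact hk (by rw [← String.ofList_toList (s := key), h])
    rw [pv_main key extra_shift hk' ciphertext.toList 0]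
    congr 2
    congr 1
    funext j c
    rw [Nat.zero_add]
  · rw [pv_allsep_goA key extra_shift ciphertext.toList 0 hall,
        pv_allsep_splice ciphertext.toList _ hall]
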